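-- pv_equiv track=rewrite | github.com/SamG97/AdventOfCode2019 | code/day25.py | drop_generator
-- ===== SOURCE A (Python) =====
-- def drop_generator(items):
--     for item in items:
--         command = f"drop {item}"
--         for c in command:
--             yield ord(c)
--         yield 10
--     for c in "south":
--         yield ord(c)
--     yield 10
-- ===== SOURCE B (Python) =====
-- def drop_generator(items):
--     text = "".join(f"drop {item}\n" for item in items) + "south\n"
--     for c in text:
--         yield ord(c)
-- ===== Notes on version B (the rewrite author's own statement) =====
-- stated objective: simpler
-- what changed: B materializes the whole output text as one string (joined drop lines plus 'south\n') and yields ordinals in a single flat pass, replacing A's nested per-item/per-char loops and two trailing loops.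
import Mathlib
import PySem

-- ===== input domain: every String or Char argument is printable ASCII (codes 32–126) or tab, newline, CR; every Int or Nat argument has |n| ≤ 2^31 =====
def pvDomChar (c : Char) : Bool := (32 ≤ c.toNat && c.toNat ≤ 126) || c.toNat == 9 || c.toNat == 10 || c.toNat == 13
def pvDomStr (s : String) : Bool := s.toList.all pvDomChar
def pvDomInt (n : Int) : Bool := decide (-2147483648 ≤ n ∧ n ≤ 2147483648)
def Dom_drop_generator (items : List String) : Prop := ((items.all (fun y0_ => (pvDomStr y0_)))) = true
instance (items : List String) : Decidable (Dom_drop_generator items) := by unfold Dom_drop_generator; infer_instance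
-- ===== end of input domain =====

-- ===== PORT A =====
def drop_generator (items : List String) : List Int :=
  (items.foldl
    (fun acc item =>
      acc ++ (("drop " ++ item).toList.map (fun c => (c.toNat : Int))) ++ [10])
    [])
  ++ ("south".toList.map (fun c => (c.toNat : Int))) ++ [10]

-- ===== PORT B =====
-- B: build the whole output text once, then one flat pass over its characters.
def drop_generator_alt (items : List String) : List Int :=
  let text := (items.map (fun item => "drop " ++ item ++ "\n")).foldl (· ++ ·) "" ++ "south\n"
  text.toList.map (fun c => (c.toNat : Int))

-- ===== PRECONDITION & SPEC =====
def Spec_drop_generator (items : List String) (out : List Int) : Prop := out = drop_generator_alt items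
instance (items : List String) (out : List Int) : Decidable (Spec_drop_generator items out) := by unfold Spec_drop_generator; infer_instance

-- ===== CLAIM (what is proved, stated in full; the proofs are below) =====
def Claim_equal_drop_generator : Prop := ∀ (items : List String), Dom_drop_generator items → Spec_drop_generator items (drop_generator items)

-- ===== LEMMAS AND PROOFS =====

-- ===== VERDICT (by name: the statement is the Claim_ definition above) =====
theorem textFold (items : List String) (pre : String) :
    ((items.map (fun item => "drop " ++ item ++ "\n")).foldl (· ++ ·) pre).toList.map
        (fun c => (c.toNat : Int))
      = items.foldl
          (fun acc item =>
            acc ++ (("drop " ++ item).toList.map (fun c => (c.toNat : Int))) ++ [10])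
          (pre.toList.map (fun c => (c.toNat : Int))) := by
  induction items generalizing pre with
  | nil => simp
  | cons x xs ih =>
    simp only [List.map_cons, List.foldl_cons, ih]
    congr 1
    simp [String.toList_append]

theorem drop_generator_spec : Claim_equal_drop_generator := by
  intro items _
  unfold Spec_drop_generator drop_generator drop_generator_alt
  simp only [String.toList_append, List.map_append, textFold]
  simp
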